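-- pv_equiv track=rewrite | github.com/derekwei77/USACOTraining | Chapter1/dualpal.py | checkDualPal
-- ===== SOURCE A (Python) =====
-- import math
--
-- def isPalindrome(numberStr):
--     reversedNumber = []
--     for i in range(len(numberStr)):
--         reversedNumber.append(numberStr[len(numberStr) - 1 - i])
--     for i in range(len(numberStr)):
--         if (numberStr[i] != reversedNumber[i]):
--             return False
--     return True
--
-- def tenToBase(number, base):
--     numberInBase = []
--     while number > 0:
--         remainder = number % base
--         if remainder >= 10:
--             remainder = chr(remainder - 10 + ord('A'))
--         number = math.floor(number / base)
--         numberInBase.append(remainder)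
--     numberInBase.reverse()
--     return numberInBase
--
-- def checkDualPal(number):
--     count = 0
--     for base in range(2, 11):
--         numberInBase = tenToBase(number, base)
--         if (isPalindrome(numberInBase)):
--             count += 1
--         if (count >= 2):
--             return True
--     return False
-- ===== SOURCE B (Python) =====
-- def checkDualPal(number):
--     count = 0
--     for base in range(2, 11):
--         n = number
--         rev = 0
--         fwd = 0
--         p = 1
--         while n > 0:
--             d = n % base
--             rev = rev * base + d
--             fwd = fwd + d * p
--             p *= base
--             n //= base
--         if rev == fwd:
--             count += 1
--             if count >= 2:
--                 return True
--     return False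
-- ===== Notes on version B (the rewrite author's own statement) =====
-- stated objective: alternative
-- what changed: Replaces the digit-list construction (tenToBase) and index-wise list palindrome check (isPalindrome) with a single arithmetic loop per base that reverses the number numerically (rev) while rebuilding its forward value (fwd), declaring the base palindromic iff rev == fwd; no lists are built at all.
import Mathlib
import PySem

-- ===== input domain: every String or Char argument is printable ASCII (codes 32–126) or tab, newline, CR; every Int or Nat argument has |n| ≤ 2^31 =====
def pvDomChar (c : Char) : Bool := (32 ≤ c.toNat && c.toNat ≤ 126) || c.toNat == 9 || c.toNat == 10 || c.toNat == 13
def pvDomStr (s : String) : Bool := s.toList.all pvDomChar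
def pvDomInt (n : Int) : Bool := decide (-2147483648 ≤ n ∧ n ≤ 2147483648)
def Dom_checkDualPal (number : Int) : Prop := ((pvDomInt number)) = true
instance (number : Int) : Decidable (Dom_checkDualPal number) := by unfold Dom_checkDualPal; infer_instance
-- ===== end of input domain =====

-- B replaces A's digit-list building and list palindrome check by one arithmetic
-- reverse-and-rebuild loop per base (alternative decomposition, no lists).

-- ===== PORT A =====
-- reversedNumber built by the first index loop; the second loop early-returns False
-- on the first mismatch, which List.all reproduces exactly (all indices in range).
def isPalindrome (numberStr : List Int) : Bool :=
  let reversedNumber := (List.range numberStr.length).foldl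
      (fun acc i => acc ++ [numberStr.getD (numberStr.length - 1 - i) 0]) []
  (List.range numberStr.length).all
      (fun i => numberStr.getD i 0 == reversedNumber.getD i 0)

-- the while loop, with fuel number.toNat + 1 (sufficient: number shrinks strictly each
-- step for the bases 2..10 used).  Python's 'remainder >= 10' chr-branch is unreachable
-- here since remainder < base ≤ 10, so digits stay integers.  math.floor(number/base)
-- equals floor division exactly for |number| ≤ 2^31 (float quotient error is far below
-- the 1/10 gap to the nearest integer), ported as PySem.Int.floordiv.
def tenToBaseLoop : Nat → Int → Int → List Int → List Int
  | 0, _, _, acc => acc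
  | f + 1, number, base, acc =>
    if number > 0 then
      tenToBaseLoop f (PySem.Int.floordiv number base) base
        (acc ++ [PySem.Int.mod number base])
    else acc

def tenToBase (number base : Int) : List Int :=
  (tenToBaseLoop (number.toNat + 1) number base []).reverse

def checkDualPalGo (number : Int) : List Int → Int → Bool
  | [], _ => false
  | base :: rest, count =>
    let count' := if isPalindrome (tenToBase number base) then count + 1 else count
    if count' ≥ 2 then true else checkDualPalGo number rest count'

def checkDualPal (number : Int) : Bool :=
  checkDualPalGo number (PySem.List.pyRange 2 11 1) 0

-- ===== PORT B =====
-- Source B's while loop: consume digits of n, building rev (reversed value) and fwd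
-- (forward value) arithmetically; same fuel convention as above.
def revLoop : Nat → Int → Int → Int → Int → Int → Int × Int
  | 0, _, _, rev, fwd, _ => (rev, fwd)
  | f + 1, n, base, rev, fwd, p =>
    if n > 0 then
      let d := PySem.Int.mod n base
      revLoop f (PySem.Int.floordiv n base) base (rev * base + d) (fwd + d * p) (p * base)
    else (rev, fwd)

def checkDualPalAltGo (number : Int) : List Int → Int → Bool
  | [], _ => false
  | base :: rest, count =>
    let rf := revLoop (number.toNat + 1) number base 0 0 1
    let count' := if rf.1 == rf.2 then count + 1 else count
    if count' ≥ 2 then true else checkDualPalAltGo number rest count'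

def checkDualPal_alt (number : Int) : Bool :=
  checkDualPalAltGo number (PySem.List.pyRange 2 11 1) 0

-- ===== PRECONDITION & SPEC =====
def Spec_checkDualPal (number : Int) (out : Bool) : Prop := out = checkDualPal_alt number
instance (number : Int) (out : Bool) : Decidable (Spec_checkDualPal number out) := by unfold Spec_checkDualPal; infer_instance

-- ===== CLAIM (what is proved, stated in full; the proofs are below) =====
def Claim_equal_checkDualPal : Prop := ∀ (number : Int), Dom_checkDualPal number → Spec_checkDualPal number (checkDualPal number)

-- ===== LEMMAS AND PROOFS =====

/-- The digit stream (least-significant first) both loops consume. -/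
def pvDigs (b : Int) : Nat → Int → List Int
  | 0, _ => []
  | f + 1, n => if n > 0 then PySem.Int.mod n b :: pvDigs b f (PySem.Int.floordiv n b) else []

/-- Value of a least-significant-first digit list. -/
def pvValL (b : Int) : List Int → Int
  | [] => 0
  | d :: t => d + b * pvValL b t

theorem tenToBaseLoop_eq (f : Nat) (b : Int) : ∀ (n : Int) (acc : List Int),
    tenToBaseLoop f n b acc = acc ++ pvDigs b f n := by
  induction f with
  | zero => intro n acc; simp [tenToBaseLoop, pvDigs]
  | succ f ih =>
    intro n acc
    simp only [tenToBaseLoop, pvDigs]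
    split
    · rw [ih]; simp
    · simp

theorem revLoop_eq (f : Nat) (b : Int) : ∀ (n rev fwd p : Int),
    revLoop f n b rev fwd p =
      ((pvDigs b f n).foldl (fun a d => a * b + d) rev,
        fwd + p * pvValL b (pvDigs b f n)) := by
  induction f with
  | zero => intro n rev fwd p; simp [revLoop, pvDigs, pvValL]
  | succ f ih =>
    intro n rev fwd p
    simp only [revLoop, pvDigs]
    split
    · rw [ih]
      simp only [List.foldl_cons, pvValL, Prod.mk.injEq]
      exact ⟨trivial, by ring⟩
    · simp [pvValL]

theorem pvValL_append (b : Int) (d : Int) : ∀ (l : List Int),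
    pvValL b (l ++ [d]) = pvValL b l + d * b ^ l.length := by
  intro l
  induction l with
  | nil => simp [pvValL]
  | cons x t ih => simp [pvValL, ih, pow_succ]; ring

theorem foldl_horner (b : Int) : ∀ (l : List Int) (a : Int),
    l.foldl (fun x d => x * b + d) a = a * b ^ l.length + pvValL b l.reverse := by
  intro l
  induction l with
  | nil => intro a; simp [pvValL]
  | cons d t ih =>
    intro a
    simp only [List.foldl_cons, ih, List.reverse_cons, pvValL_append, List.length_cons,
      List.length_reverse]
    ring

theorem pvDigs_bounds (b : Int) (hb : 0 < b) : ∀ (f : Nat) (n d : Int),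
    d ∈ pvDigs b f n → 0 ≤ d ∧ d < b := by
  intro f
  induction f with
  | zero => intro n d h; simp [pvDigs] at h
  | succ f ih =>
    intro n d h
    simp only [pvDigs] at h
    split at h
    · rcases List.mem_cons.mp h with h | h
      · subst h
        exact ⟨PySem.Int.mod_nonneg n hb, PySem.Int.mod_lt n hb⟩
      · exact ih _ _ h
    · simp at h

theorem pvValL_inj (b : Int) (hb : 0 < b) : ∀ (l1 l2 : List Int),
    l1.length = l2.length → (∀ d ∈ l1, 0 ≤ d ∧ d < b) → (∀ d ∈ l2, 0 ≤ d ∧ d < b) →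
    pvValL b l1 = pvValL b l2 → l1 = l2 := by
  intro l1
  induction l1 with
  | nil => intro l2 hlen _ _ _; cases l2 with
    | nil => rfl
    | cons _ _ => simp at hlen
  | cons d1 t1 ih =>
    intro l2 hlen h1 h2 hval
    cases l2 with
    | nil => simp at hlen
    | cons d2 t2 =>
      simp only [pvValL] at hval
      obtain ⟨hd1, hd1'⟩ := h1 d1 (List.mem_cons_self ..)
      obtain ⟨hd2, hd2'⟩ := h2 d2 (List.mem_cons_self ..)
      have hv : pvValL b t1 = pvValL b t2 := by
        rcases lt_trichotomy (pvValL b t1) (pvValL b t2) with h | h | h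
        · nlinarith
        · exact h
        · nlinarith
      have hd : d1 = d2 := by
        rw [hv] at hval; linarith
      have ht : t1 = t2 :=
        ih t2 (by simpa using hlen) (fun d hd => h1 d (List.mem_cons_of_mem _ hd))
          (fun d hd => h2 d (List.mem_cons_of_mem _ hd)) hv
      rw [hd, ht]

theorem foldl_append_map {α : Type} (f : α → Int) : ∀ (l : List α) (acc : List Int),
    l.foldl (fun acc i => acc ++ [f i]) acc = acc ++ l.map f := by
  intro l
  induction l with
  | nil => intro acc; simp
  | cons x t ih => intro acc; simp [ih]

theorem isPalindrome_eq (L : List Int) : isPalindrome L = decide (L = L.reverse) := by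
  unfold isPalindrome
  rw [foldl_append_map]
  have hrev : (List.range L.length).map (fun i => L.getD (L.length - 1 - i) 0) = L.reverse := by
    apply List.ext_getElem
    · simp
    · intro i hi hi'
      have hi'' : i < L.length := by simpa using hi'
      have hidx : L.length - 1 - i < L.length := by omega
      simp only [List.getElem_map, List.getElem_range, List.getElem_reverse]
      rw [List.getD_eq_getElem L 0 hidx]
  simp only [List.nil_append, hrev]
  by_cases h : L = L.reverse
  · rw [decide_eq_true h, ← h]
    simp [List.all_eq_true]
  · rw [decide_eq_false h]
    cases hA : ((List.range L.length).all fun i => L.getD i 0 == L.reverse.getD i 0) with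
    | false => rfl
    | true =>
      exfalso
      apply h
      rw [List.all_eq_true] at hA
      apply List.ext_getElem (by simp)
      intro i hi hi'
      have hmem := hA i (List.mem_range.mpr hi)
      rw [List.getD_eq_getElem L 0 hi, List.getD_eq_getElem L.reverse 0 (by simpa using hi)] at hmem
      simpa using hmem

theorem perBase (n b : Int) (hb : 2 ≤ b) :
    isPalindrome (tenToBase n b) =
      ((revLoop (n.toNat + 1) n b 0 0 1).1 == (revLoop (n.toNat + 1) n b 0 0 1).2) := by
  by_cases hn : n > 0
  · have hbd : ∀ d ∈ pvDigs b (n.toNat + 1) n, 0 ≤ d ∧ d < b :=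
      fun d hd => pvDigs_bounds b (by omega) _ n d hd
    have hLHS : tenToBase n b = (pvDigs b (n.toNat + 1) n).reverse := by
      unfold tenToBase; rw [tenToBaseLoop_eq]; simp
    rw [hLHS, isPalindrome_eq, List.reverse_reverse, revLoop_eq]
    simp only [foldl_horner, zero_mul, zero_add, one_mul]
    generalize pvDigs b (n.toNat + 1) n = D at hbd ⊢
    by_cases hpal : D.reverse = D
    · rw [hpal]; simp
    · rw [decide_eq_false hpal]
      symm
      rw [beq_eq_false_iff_ne]
      intro hEq
      exact hpal (pvValL_inj b (by omega) D.reverse D (by simp)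
        (fun d hd => hbd d (List.mem_reverse.mp hd)) hbd hEq)
  · have hD : pvDigs b (n.toNat + 1) n = [] := by
      simp [pvDigs, hn]
    have hA : tenToBase n b = [] := by
      unfold tenToBase; rw [tenToBaseLoop_eq, hD]; simp
    rw [hA, isPalindrome_eq, revLoop_eq, hD]
    simp [pvValL]

theorem go_congr (number : Int) : ∀ (bases : List Int) (count : Int),
    (∀ b ∈ bases, isPalindrome (tenToBase number b) =
      ((revLoop (number.toNat + 1) number b 0 0 1).1 ==
        (revLoop (number.toNat + 1) number b 0 0 1).2)) →
    checkDualPalGo number bases count = checkDualPalAltGo number bases count := by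
  intro bases
  induction bases with
  | nil => intro count _; rfl
  | cons b rest ih =>
    intro count h
    simp only [checkDualPalGo, checkDualPalAltGo]
    rw [← h b (List.mem_cons_self ..)]
    split
    · split
      · rfl
      · exact ih _ (fun b' hb' => h b' (List.mem_cons_of_mem _ hb'))
    · split
      · rfl
      · exact ih _ (fun b' hb' => h b' (List.mem_cons_of_mem _ hb'))

-- ===== VERDICT (by name: the statement is the Claim_ definition above) =====
theorem checkDualPal_spec : Claim_equal_checkDualPal := by
  intro number _
  unfold Spec_checkDualPal checkDualPal checkDualPal_alt
  apply go_congr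
  intro b hb
  rw [PySem.List.mem_pyRange_one] at hb
  exact perBase number b hb.1
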